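-- pv_equiv track=rewrite | github.com/JulianNeff/advent_of_code | 2025/day_03.py | solve
-- ===== SOURCE A (Python) =====
-- def parse_data(data):
--     return [list(map(int, line)) for line in data.splitlines() if line]
--
-- def solve(data, is_part_a):
--     data = parse_data(data)
--     total_sum = 0
--     k = 2 if is_part_a else 12
--
--     for line in data:
--         to_remove = len(line) - k
--         stack = []
--         for digit in line:
--             while to_remove > 0 and stack and stack[-1] < digit:
--                 stack.pop()
--                 to_remove -= 1
--             stack.append(digit)
--
--         result_digits = stack[:k]
--         total_sum += int("".join(map(str, result_digits)))
--     return total_sum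
-- ===== SOURCE B (Python) =====
-- def parse_data(data):
--     return [list(map(int, line)) for line in data.splitlines() if line]
--
-- def pick(line, k):
--     # greedy positional selection: leftmost maximum of the feasible window, then recurse
--     if len(line) <= k:
--         return line
--     if k == 0:
--         return []
--     window = line[:len(line) - k + 1]
--     best = max(window)
--     m = window.index(best)
--     return [best] + pick(line[m + 1:], k - 1)
--
-- def solve(data, is_part_a):
--     k = 2 if is_part_a else 12
--     return sum(int("".join(map(str, pick(line, k)))) for line in parse_data(data))
-- ===== Notes on version B (the rewrite author's own statement) =====
-- stated objective: alternative
-- what changed: The monotonic-stack-with-removal-budget inner loop is replaced by a recursive k-position greedy selection: pick the leftmost maximum digit in the feasible window and recurse on the suffix.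
import Mathlib
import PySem

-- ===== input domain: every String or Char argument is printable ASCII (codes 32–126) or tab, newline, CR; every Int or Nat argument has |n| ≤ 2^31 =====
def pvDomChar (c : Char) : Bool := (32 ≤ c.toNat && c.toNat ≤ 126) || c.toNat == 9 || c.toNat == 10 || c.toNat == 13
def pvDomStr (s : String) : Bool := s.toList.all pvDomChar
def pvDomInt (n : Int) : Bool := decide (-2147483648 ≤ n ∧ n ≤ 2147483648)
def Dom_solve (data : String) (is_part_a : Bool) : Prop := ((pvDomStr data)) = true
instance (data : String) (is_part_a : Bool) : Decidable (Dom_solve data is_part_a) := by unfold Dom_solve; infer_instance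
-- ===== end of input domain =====

-- B replaces A's monotonic-stack inner loop by a recursive k-position greedy selection
-- (leftmost maximum of the feasible window); same parse and join-to-int structure, same values.

-- ===== PORT A =====
-- shared module helper parse_data: [list(map(int, line)) for line in data.splitlines() if line]
def pvParseData (data : String) : List (List Int) :=
  ((PySem.Str.splitlines data).filter (fun l => !(l == ""))).map
    (fun l => l.toList.map (fun c => (PySem.Int.ofChars? [c]).getD 0))

-- shared expression int("".join(map(str, ds))) appearing identically in A and B
def pvJoinInt (ds : List Int) : Int :=
  (PySem.Int.ofStr? (PySem.Str.join "" (ds.map PySem.Int.toStr))).getD 0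

-- the while-loop 'while to_remove > 0 and stack and stack[-1] < digit: pop'; the stack is kept
-- reversed (head = Python's stack[-1] top), the final stack is reversed back below
def pvPopWhile (st : List Int) (r : Int) (d : Int) : List Int × Int :=
  match st with
  | [] => (st, r)
  | t :: rest => if 0 < r ∧ t < d then pvPopWhile rest (r - 1) d else (st, r)

-- the 'for digit in line' loop over state (stack, to_remove)
def pvStackRun (st : List Int) (r : Int) (line : List Int) : List Int × Int :=
  line.foldl (fun s d => let p := pvPopWhile s.1 s.2 d; (d :: p.1, p.2)) (st, r)

def solve (data : String) (is_part_a : Bool) : Int :=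
  let k : Nat := if is_part_a then 2 else 12
  (pvParseData data).foldl
    (fun total line =>
      total + pvJoinInt ((pvStackRun [] ((line.length : Int) - (k : Int)) line).1.reverse.take k))
    0

-- ===== PORT B =====
-- pick(line, k): greedy positional selection (the '[]' fallbacks are unreachable: the window
-- is nonempty whenever they are consulted)
def pvPick (line : List Int) (k : Nat) : List Int :=
  if line.length ≤ k then line
  else if hk : k = 0 then []
  else
    let window := line.take (line.length - k + 1)
    match PySem.List.max? window (fun x => x) with
    | none => []
    | some best =>
      match PySem.List.index? window best with
      | none => []
      | some m => best :: pvPick (line.drop (m + 1)) (k - 1)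
termination_by k
decreasing_by omega

def solve_alt (data : String) (is_part_a : Bool) : Int :=
  let k : Nat := if is_part_a then 2 else 12
  (pvParseData data).foldl (fun total line => total + pvJoinInt (pvPick line k)) 0

-- ===== PRECONDITION & SPEC =====
-- Pre_ excludes exactly the inputs on which the Python A raises ValueError: a non-empty line
-- containing a character that is not a decimal digit (int(c) fails in parse_data).
def Pre_solve (data : String) (is_part_a : Bool) : Prop :=
  ∀ l ∈ PySem.Str.splitlines data, l = "" ∨ PySem.Str.strIsdigit l = true
instance (data : String) (is_part_a : Bool) : Decidable (Pre_solve data is_part_a) := by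
  unfold Pre_solve; infer_instance

def pvWitness_solve : String × Bool := ("95\n310452\n", true)

def Spec_solve (data : String) (is_part_a : Bool) (out : Int) : Prop := out = solve_alt data is_part_a
instance (data : String) (is_part_a : Bool) (out : Int) : Decidable (Spec_solve data is_part_a out) := by unfold Spec_solve; infer_instance

-- ===== CLAIM (what is proved, stated in full; the proofs are below) =====
def Claim_equal_solve : Prop := ∀ (data : String) (is_part_a : Bool), Dom_solve data is_part_a → Pre_solve data is_part_a → Spec_solve data is_part_a (solve data is_part_a)

-- ===== LEMMAS AND PROOFS =====

theorem pvPopWhile_nonpos (st : List Int) (r d : Int) (h : r ≤ 0) :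
    pvPopWhile st r d = (st, r) := by
  cases st with
  | nil => rfl
  | cons t rest => simp [pvPopWhile]; omega

theorem pvStackRun_nonpos (xs : List Int) : ∀ (st : List Int) (r : Int), r ≤ 0 →
    pvStackRun st r xs = (xs.reverse ++ st, r) := by
  induction xs with
  | nil => intro st r _; simp [pvStackRun]
  | cons x tail ih =>
    intro st r h
    simp only [pvStackRun, List.foldl_cons, pvPopWhile_nonpos st r x h]
    have := ih (x :: st) r h
    simp [pvStackRun] at this
    simp [this]

theorem pvPopWhile_diff (st : List Int) (r d : Int) :
    (pvPopWhile st r d).2 - (pvPopWhile st r d).1.length = r - st.length := by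
  induction st generalizing r with
  | nil => simp [pvPopWhile]
  | cons t rest ih =>
    simp only [pvPopWhile]
    split
    · have := ih (r - 1)
      simp only [List.length_cons] at this ⊢
      push_cast at this ⊢
      omega
    · simp

theorem pvPopWhile_mem (st : List Int) (r d : Int) :
    ∀ y ∈ (pvPopWhile st r d).1, y ∈ st := by
  induction st generalizing r with
  | nil => simp [pvPopWhile]
  | cons t rest ih =>
    simp only [pvPopWhile]
    split
    · intro y hy; exact List.mem_cons_of_mem _ (ih (r - 1) y hy)
    · intro y hy; exact hy

theorem pvPopWhile_all (st : List Int) (r d : Int) (hall : ∀ y ∈ st, y < d)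
    (hb : (st.length : Int) ≤ r) : pvPopWhile st r d = ([], r - st.length) := by
  induction st generalizing r with
  | nil => simp [pvPopWhile]
  | cons t rest ih =>
    simp only [pvPopWhile]
    rw [if_pos]
    · rw [ih (r - 1) (fun y hy => hall y (List.mem_cons_of_mem _ hy)) (by simp at hb ⊢; omega)]
      simp; push_cast; ring_nf
    · constructor
      · simp at hb; omega
      · exact hall t List.mem_cons_self

theorem pvPopWhile_append_last (st : List Int) (r d x : Int)
    (h : ¬(d < x ∧ (1 : Int) ≤ r - st.length)) :
    pvPopWhile (st ++ [d]) r x = ((pvPopWhile st r x).1 ++ [d], (pvPopWhile st r x).2) := by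
  induction st generalizing r with
  | nil =>
    simp only [List.length_nil, Nat.cast_zero, sub_zero] at h
    simp only [List.nil_append, pvPopWhile]
    rw [if_neg (by omega)]
  | cons t rest ih =>
    simp only [List.cons_append, pvPopWhile]
    split
    · exact ih (r - 1) (by simp at h ⊢; intro hdx; have := h hdx; push_cast at this ⊢; omega)
    · simp

theorem pvStackRun_mem (xs : List Int) : ∀ (st : List Int) (r : Int),
    ∀ y ∈ (pvStackRun st r xs).1, y ∈ st ∨ y ∈ xs := by
  induction xs with
  | nil => intro st r y hy; simp [pvStackRun] at hy; exact Or.inl hy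
  | cons x tail ih =>
    intro st r y hy
    simp only [pvStackRun, List.foldl_cons] at hy
    rcases ih _ _ y hy with h | h
    · rcases List.mem_cons.mp h with h | h
      · exact Or.inr (by simp [h])
      · exact Or.inl (pvPopWhile_mem st r x y h)
    · exact Or.inr (List.mem_cons_of_mem _ h)

theorem pvStackRun_diff (xs : List Int) : ∀ (st : List Int) (r : Int),
    (pvStackRun st r xs).2 - (pvStackRun st r xs).1.length
      = r - st.length - xs.length := by
  induction xs with
  | nil => intro st r; simp [pvStackRun]
  | cons x tail ih =>
    intro st r
    simp only [pvStackRun, List.foldl_cons]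
    have h1 := pvPopWhile_diff st r x
    have h2 := ih (x :: (pvPopWhile st r x).1) (pvPopWhile st r x).2
    simp only [pvStackRun, List.length_cons] at h2 ⊢
    push_cast at h1 h2 ⊢
    omega

-- a bottom element d that the budget can never reach just rides along
theorem pvStackRun_bottom (xs : List Int) : ∀ (st : List Int) (r d : Int),
    (∀ p (hp : p < xs.length), d < xs[p] → r - st.length ≤ p) →
    pvStackRun (st ++ [d]) r xs
      = ((pvStackRun st r xs).1 ++ [d], (pvStackRun st r xs).2) := by
  induction xs with
  | nil => intro st r d _; simp [pvStackRun]
  | cons x tail ih =>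
    intro st r d hcond
    have hx : ¬(d < x ∧ (1 : Int) ≤ r - st.length) := by
      rintro ⟨hdx, hr⟩
      have := hcond 0 (by simp) (by simpa using hdx)
      omega
    simp only [pvStackRun, List.foldl_cons, pvPopWhile_append_last st r d x hx]
    have hdiff := pvPopWhile_diff st r x
    have hih := ih (x :: (pvPopWhile st r x).1) (pvPopWhile st r x).2 d (by
      intro p hp hdp
      have := hcond (p + 1) (by simpa using Nat.succ_lt_succ hp) (by simpa using hdp)
      simp only [List.length_cons] at ⊢
      push_cast at hdiff ⊢
      omega)
    simp only [pvStackRun] at hih ⊢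
    simpa [List.cons_append] using hih

-- key characterization: the first surviving stack element is the leftmost maximum of the window
theorem pvStackRun_split (pre tail : List Int) (d r : Int)
    (hm : (pre.length : Int) ≤ r)
    (hpre : ∀ y ∈ pre, y < d)
    (htail : ∀ p (hp : p < tail.length), d < tail[p] → r - pre.length ≤ p) :
    (pvStackRun [] r (pre ++ d :: tail)).1.reverse
      = d :: (pvStackRun [] (r - pre.length) tail).1.reverse := by
  have hsplit : pvStackRun [] r (pre ++ d :: tail)
      = pvStackRun (pvStackRun [] r pre).1 (pvStackRun [] r pre).2 (d :: tail) := by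
    simp [pvStackRun, List.foldl_append]
  set stp := (pvStackRun [] r pre).1 with hstp
  set bp := (pvStackRun [] r pre).2 with hbp
  have hdiffp : bp - stp.length = r - pre.length := by
    have := pvStackRun_diff pre [] r; simpa using this
  have hallp : ∀ y ∈ stp, y < d := by
    intro y hy
    rcases pvStackRun_mem pre [] r y hy with h | h
    · simp at h
    · exact hpre y h
  have hpop : pvPopWhile stp bp d = ([], r - pre.length) := by
    rw [pvPopWhile_all stp bp d hallp (by omega), hdiffp]
  rw [hsplit]
  simp only [pvStackRun, List.foldl_cons, hpop]
  have hbot := pvStackRun_bottom tail [] (r - pre.length) d (by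
    intro p hp hdp
    have := htail p hp hdp
    simpa using this)
  simp only [List.nil_append, pvStackRun] at hbot
  rw [hbot]
  simp

theorem pvStack_eq_pick : ∀ (k : Nat) (xs : List Int),
    (pvStackRun [] ((xs.length : Int) - (k : Int)) xs).1.reverse.take k
      = pvPick xs k := by
  intro k
  induction k using Nat.strong_induction_on with
  | _ k ih =>
    intro xs
    by_cases hlen : xs.length ≤ k
    · rw [pvStackRun_nonpos xs [] _ (by omega)]
      rw [pvPick, if_pos hlen]
      simp [List.take_of_length_le hlen]
    · rcases Nat.eq_zero_or_pos k with hk0 | hkpos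
      · subst hk0
        rw [pvPick, if_neg hlen]
        simp
      · -- long xs: greedy branch
        rw [pvPick, if_neg hlen, dif_neg (by omega)]
        set W := xs.length - k + 1 with hW
        set window := xs.take W with hwindow
        have hWlen : window.length = W := by
          rw [hwindow, List.length_take]; omega
        have hWpos : 0 < window.length := by omega
        obtain ⟨best, hbest⟩ : ∃ b, PySem.List.max? window (fun x => x) = some b := by
          cases hmx : PySem.List.max? window (fun x => x) with
          | none => exact absurd ((PySem.List.max?_eq_none_iff _ _).mp hmx) (by
              intro h; rw [h] at hWpos; simp at hWpos)
          | some b => exact ⟨b, rfl⟩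
        have hbmem : best ∈ window := PySem.List.max?_mem hbest
        have hbmax : ∀ y ∈ window, y ≤ best := by
          have := PySem.List.max?_isMax hbest; simpa using this
        obtain ⟨m, hm⟩ : ∃ m, PySem.List.index? window best = some m := by
          cases hidx : PySem.List.index? window best with
          | none => exact absurd ((PySem.List.index?_eq_none_iff _ _).mp hidx) (by simp [hbmem])
          | some m => exact ⟨m, rfl⟩
        simp only [hbest, hm]
        obtain ⟨hmlt, hwm, hfirst⟩ := PySem.List.getElem_of_index?_eq_some hm
        have hmlt' : m < xs.length := by omega
        have hlinem : xs[m] = best := by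
          rw [← hwm]; simp [hwindow]
        -- decompose xs around position m
        have hdecomp : xs = xs.take m ++ best :: xs.drop (m + 1) := by
          conv_lhs => rw [← List.take_append_drop m xs]
          rw [List.drop_eq_getElem_cons hmlt', hlinem]
        have hprelen : (xs.take m).length = m := by simp; omega
        have hpre : ∀ y ∈ xs.take m, y < best := by
          intro y hy
          obtain ⟨j, hj, hjy⟩ := List.getElem_of_mem hy
          rw [List.getElem_take] at hjy
          have hjm : j < m := by rw [hprelen] at hj; exact hj
          have hjW : j < window.length := by omega
          have hwj : window[j] = xs[j] := by simp [hwindow]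
          have hne : window[j] ≠ best := hfirst j hjm
          have hle : window[j] ≤ best := hbmax _ (List.getElem_mem hjW)
          rw [← hjy, ← hwj]
          omega
        have htail : ∀ p (hp : p < (xs.drop (m + 1)).length),
            best < (xs.drop (m + 1))[p] → ((xs.length : Int) - k) - m ≤ p := by
          intro p hp hbp
          by_contra hcon
          push_neg at hcon
          have hpW : m + 1 + p < W := by omega
          have hpl : m + 1 + p < xs.length := by omega
          have hgw : (xs.drop (m + 1))[p] = window[m + 1 + p]'(by omega) := by
            simp [hwindow, Nat.add_comm]
          have := hbmax (window[m + 1 + p]'(by omega)) (List.getElem_mem (by omega))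
          rw [hgw] at hbp
          omega
        have hsplit := pvStackRun_split (xs.take m) (xs.drop (m + 1)) best
          ((xs.length : Int) - k) (by rw [hprelen]; omega) hpre
          (by rw [hprelen]; exact htail)
        rw [hprelen] at hsplit
        have hlen2 : (List.take m xs ++ best :: List.drop (m + 1) xs).length = xs.length := by
          rw [← hdecomp]
        conv_lhs => rw [hdecomp]
        rw [hlen2, hsplit]
        have hdroplen : ((xs.drop (m + 1)).length : Int) - (k - 1 : Nat)
            = (xs.length : Int) - k - m := by
          simp; push_cast; omega
        cases k with
        | zero => omega
        | succ k' =>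
          simp only [List.take_succ_cons]
          congr 1
          have := ih k' (by omega) (xs.drop (m + 1))
          rw [show ((xs.length : Int) - (k' + 1 : Nat) - m) = ((xs.drop (m+1)).length : Int) - (k' : Int) by simp; push_cast; omega]
          simpa using this

-- ===== VERDICT (by name: the statement is the Claim_ definition above) =====
theorem solve_spec : Claim_equal_solve := by
  intro data is_part_a _ _
  unfold Spec_solve solve solve_alt
  have hfun : ∀ k : Nat,
      (fun (total : Int) (l : List Int) =>
        total + pvJoinInt ((pvStackRun [] ((l.length : Int) - (k : Int)) l).1.reverse.take k))
      = (fun (total : Int) (l : List Int) => total + pvJoinInt (pvPick l k)) := by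
    intro k; funext total l; rw [pvStack_eq_pick]
  simp only [hfun]
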